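-- pv_equiv track=rewrite | github.com/Tananashvili/Footbal-Stats | crocobet_game_stats.py | find_under_over
-- ===== SOURCE A (Python) =====
-- def find_under_over(outcomes: list) -> tuple:
--     under = None
--     over = None
--     for outcome in outcomes:
--         name = (outcome.get("outcomeName") or "").strip().lower()
--         if name.startswith("under"):
--             under = outcome
--         elif name.startswith("over"):
--             over = outcome
--     return under, over
-- ===== SOURCE B (Python) =====
-- def _norm_name(outcome):
--     return (outcome.get("outcomeName") or "").strip().lower()
--
--
-- def find_under_over(outcomes: list) -> tuple:
--     # Staged passes: filter each kind of outcome, then take the last match.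
--     unders = [o for o in outcomes if _norm_name(o).startswith("under")]
--     overs = [o for o in outcomes if _norm_name(o).startswith("over")]
--     return (unders[-1] if unders else None, overs[-1] if overs else None)
-- ===== Notes on version B (the rewrite author's own statement) =====
-- stated objective: alternative
-- what changed: B replaces A's single stateful pass that overwrites two slots with two staged filter passes (list comprehensions selecting under- and over-prefixed outcomes) followed by taking the last element of each filtered list.
import Mathlib
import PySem

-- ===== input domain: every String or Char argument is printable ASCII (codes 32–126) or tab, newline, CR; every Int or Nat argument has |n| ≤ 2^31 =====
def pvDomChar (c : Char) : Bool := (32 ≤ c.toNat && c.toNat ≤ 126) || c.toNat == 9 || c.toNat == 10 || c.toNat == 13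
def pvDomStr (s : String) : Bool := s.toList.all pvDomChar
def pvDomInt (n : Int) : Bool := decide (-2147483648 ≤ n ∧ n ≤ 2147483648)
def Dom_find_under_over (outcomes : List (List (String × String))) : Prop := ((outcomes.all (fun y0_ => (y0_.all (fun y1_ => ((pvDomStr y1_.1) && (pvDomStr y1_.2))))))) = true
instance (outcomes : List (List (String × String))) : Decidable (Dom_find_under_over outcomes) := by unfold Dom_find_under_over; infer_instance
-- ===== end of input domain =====

-- B replaces A's single stateful overwrite pass by two staged filter passes that each
-- take the last matching outcome (objective: alternative decomposition).

-- ===== PORT A =====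
-- (outcome.get("outcomeName") or "") : for strings, `x or ""` is `x.getD ""` (None → "", "" → "")
def pvNameA (outcome : List (String × String)) : String :=
  PySem.Str.lower (PySem.Str.strip (((PySem.Dict.mk outcome).get? "outcomeName").getD ""))

def pvStepA (s : Option (List (String × String)) × Option (List (String × String)))
    (outcome : List (String × String)) :
    Option (List (String × String)) × Option (List (String × String)) :=
  let name := pvNameA outcome
  if PySem.Str.startswith name "under" then (some outcome, s.2)
  else if PySem.Str.startswith name "over" then (s.1, some outcome)
  else s

def find_under_over (outcomes : List (List (String × String))) : (Option (List (String × String))) × (Option (List (String × String))) :=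
  outcomes.foldl pvStepA (none, none)

-- ===== PORT B =====
def pvNameB (outcome : List (String × String)) : String :=
  PySem.Str.lower (PySem.Str.strip (((PySem.Dict.mk outcome).get? "outcomeName").getD ""))

def find_under_over_alt (outcomes : List (List (String × String))) : (Option (List (String × String))) × (Option (List (String × String))) :=
  let unders := outcomes.filter (fun o => PySem.Str.startswith (pvNameB o) "under")
  let overs := outcomes.filter (fun o => PySem.Str.startswith (pvNameB o) "over")
  (unders.getLast?, overs.getLast?)

-- ===== PRECONDITION & SPEC =====
def Spec_find_under_over (outcomes : List (List (String × String))) (out : (Option (List (String × String))) × (Option (List (String × String)))) : Prop := out = find_under_over_alt outcomes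
instance (outcomes : List (List (String × String))) (out : (Option (List (String × String))) × (Option (List (String × String)))) : Decidable (Spec_find_under_over outcomes out) := by unfold Spec_find_under_over; infer_instance

-- ===== CLAIM (what is proved, stated in full; the proofs are below) =====
def Claim_equal_find_under_over : Prop := ∀ (outcomes : List (List (String × String))), Dom_find_under_over outcomes → Spec_find_under_over outcomes (find_under_over outcomes)

-- ===== LEMMAS AND PROOFS =====

def pvIsU (x : List (String × String)) : Bool := PySem.Str.startswith (pvNameA x) "under"
def pvIsO (x : List (String × String)) : Bool := PySem.Str.startswith (pvNameA x) "over"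

-- "under…" and "over…" prefixes are mutually exclusive (first characters differ)
theorem pvExcl (x : List (String × String)) (h : pvIsU x = true) : pvIsO x = false := by
  unfold pvIsU at h; unfold pvIsO
  rw [PySem.Str.startswith_eq, PySem.Chars.startswith_iff] at h
  rw [PySem.Str.startswith_eq, Bool.eq_false_iff]
  intro h2
  rw [PySem.Chars.startswith_iff] at h2
  obtain ⟨t1, e1⟩ := h
  obtain ⟨t2, e2⟩ := h2
  rw [← e1] at e2
  simp at e2

theorem pvStepA_eq (s : Option (List (String × String)) × Option (List (String × String)))
    (x : List (String × String)) :
    pvStepA s x = if pvIsU x then (some x, s.2) else if pvIsO x then (s.1, some x) else s := rfl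

-- A's fold ends with the last matching element of each kind (None if there is none)
theorem pvFoldA (xs : List (List (String × String)))
    (u o : Option (List (String × String))) :
    List.foldl pvStepA (u, o) xs =
      (((xs.filter pvIsU).getLast?).elim u some,
       ((xs.filter pvIsO).getLast?).elim o some) := by
  induction xs generalizing u o with
  | nil => simp
  | cons x xs ih =>
    rw [List.foldl_cons, pvStepA_eq]
    cases hU : pvIsU x with
    | true =>
      have hO := pvExcl x hU
      cases hfu : (xs.filter pvIsU).getLast? <;>
        cases hfo : (xs.filter pvIsO).getLast? <;>
          simp [List.getLast?_cons, *]
    | false =>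
      cases hO : pvIsO x <;>
        cases hfu : (xs.filter pvIsU).getLast? <;>
          cases hfo : (xs.filter pvIsO).getLast? <;>
            simp [List.getLast?_cons, *]

-- ===== VERDICT (by name: the statement is the Claim_ definition above) =====
theorem find_under_over_spec : Claim_equal_find_under_over := by
  intro outcomes _
  unfold Spec_find_under_over find_under_over find_under_over_alt
  have e1 : (fun o => PySem.Str.startswith (pvNameB o) "under") = pvIsU := rfl
  have e2 : (fun o => PySem.Str.startswith (pvNameB o) "over") = pvIsO := rfl
  rw [pvFoldA]
  simp only [e1, e2]
  cases List.getLast? (outcomes.filter pvIsU) <;>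
    cases List.getLast? (outcomes.filter pvIsO) <;> rfl
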